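-- pv_equiv track=rewrite | github.com/sunako110/Daily-Interview-Questions | day64.py | chainedWords
-- ===== SOURCE A (Python) =====
-- from collections import defaultdict
--
-- def chainedWords(words):
--     # Fill this in.
--     adj = defaultdict(list)
--     visited = defaultdict()
--     inp = defaultdict(int)
--     start = words[0][0]
--     for w in words:
--         adj[w[0]].append(w[-1])
--         visited[w[0]] = False
--         inp[w[-1]] += 1
--
--     return isEulerianCycle(start, visited, adj, inp)
--
-- def isEulerianCycle(start, visited, adj, inp):
--
--     # Do DFS traversal starting from first non zero degree vertex.
--     DFSUtil(start, visited, adj)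
--
--     # If DFS traversal doesn't visit all vertices, then return false.
--     for i in adj.keys():
--         if len(adj[i]) > 0 and visited[i] == False:
--             return False
--         # Check if in degree and out degree of every vertex is same
--         if len(adj[i]) != inp[i]:
--             return False
--
--     # Create a reversed graph
--     new_adj, new_inp, new_visited = getTranspose(adj)
--
--     # Mark all the vertices as not visited (For second DFS)
--
--     # Do DFS for reversed graph starting from first vertex.
--     # Staring Vertex must be same starting point of first DFS
--     DFSUtil(list(new_adj.keys())[0], new_visited, new_adj)
--
--     # If all vertices are not visited in second DFS, then
--     # return false
--     for i in new_adj.keys():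
--         if len(new_adj[i]) > 0 and new_visited[i] == False:
--             return False
--         # Check if in degree and out degree of every vertex is same
--         if len(new_adj[i]) != new_inp[i]:
--             return False
--
--
--     return True
--
-- def DFSUtil(v, visited, adj):
--
--     # Mark the current node as visited and print it
--     visited[v] = True
--
--     # Recur for all the vertices adjacent to this vertex
--     for i in range(len(adj[v])):
--         if not visited[adj[v][i]]:
--             DFSUtil(adj[v][i], visited, adj)
--
-- def getTranspose(adj):
--     new_adj = defaultdict(list)
--     inp = defaultdict(int)
--     visited = defaultdict()
--     for v in adj.keys():
--         # Recur for all the vertices adjacent to this vertex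
--         for i in range(len(adj[v])):
--             new_adj[adj[v][i]].append(v)
--             visited[adj[v][i]] = False
--             inp[v] += 1
--     return new_adj, inp, visited
-- ===== SOURCE B (Python) =====
-- def chainedWords(words):
--     start = words[0][0]
--     rstart = words[0][-1]
--     adj, visited, inp = {}, {}, {}
--     for w in words:
--         adj.setdefault(w[0], []).append(w[-1])
--         visited[w[0]] = False
--         inp[w[-1]] = inp.get(w[-1], 0) + 1
--
--     def sweep(graph, seen, v0):
--         # iterative DFS with an explicit stack instead of recursion
--         # (seen[v] raises KeyError for a letter that is never a graph vertex, as in DFSUtil)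
--         stack = [v0]
--         while stack:
--             v = stack.pop()
--             if not seen[v]:
--                 seen[v] = True
--                 stack.extend(graph[v])
--
--     def balanced(graph, seen, indeg):
--         return all(seen[v] and len(outs) == indeg.get(v, 0)
--                    for v, outs in graph.items())
--
--     sweep(adj, visited, start)
--     if not balanced(adj, visited, inp):
--         return False
--
--     radj, rvisited, rinp = {}, {}, {}
--     for v, outs in adj.items():
--         for n in outs:
--             radj.setdefault(n, []).append(v)
--             rvisited[n] = False
--             rinp[v] = rinp.get(v, 0) + 1
--
--     sweep(radj, rvisited, rstart)
--     return balanced(radj, rvisited, rinp)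
-- ===== Notes on version B (the rewrite author's own statement) =====
-- stated objective: alternative
-- what changed: The recursive DFSUtil is replaced by an explicit-stack iterative DFS, the helper functions are inlined into one function, the defaultdicts become plain dicts, and the two early-return check loops become a single all(...) degree-and-visited check reused for both phases.
import Mathlib
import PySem

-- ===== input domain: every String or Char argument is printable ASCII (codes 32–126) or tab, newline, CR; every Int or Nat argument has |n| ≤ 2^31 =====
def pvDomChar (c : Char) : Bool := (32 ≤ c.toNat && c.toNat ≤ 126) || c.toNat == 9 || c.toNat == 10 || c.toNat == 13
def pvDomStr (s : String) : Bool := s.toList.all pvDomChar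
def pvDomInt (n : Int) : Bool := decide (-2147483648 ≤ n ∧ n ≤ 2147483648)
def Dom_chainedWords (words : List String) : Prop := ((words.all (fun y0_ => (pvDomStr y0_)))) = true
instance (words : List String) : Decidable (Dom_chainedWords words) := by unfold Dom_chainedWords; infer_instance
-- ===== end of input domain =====

-- B replaces the recursive DFSUtil by an explicit-stack iterative DFS and inlines the helpers;
-- the equivalence below is about return values (neither program mutates its argument).

-- w[0] / w[-1]; Pre_ excludes empty strings (Python IndexError), the default is never read under Pre_
def pyFirst (w : String) : Char := w.toList.headD ' '
def pyLast (w : String) : Char := w.toList.getLastD ' '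

-- ===== PORT A =====
-- the build loop: adj[w[0]].append(w[-1]); visited[w[0]] = False; inp[w[-1]] += 1
-- (defaultdict(list) append = modify _ [] (· ++ [·]); defaultdict(int) += 1 = modify _ 0 (· + 1))
def buildA (words : List String) :
    PySem.Dict Char (List Char) × PySem.Dict Char Bool × PySem.Dict Char Int :=
  words.foldl (fun acc w =>
      (acc.1.modify (pyFirst w) [] (· ++ [pyLast w]),
       acc.2.1.insert (pyFirst w) false,
       acc.2.2.modify (pyLast w) 0 (· + 1)))
    (PySem.Dict.empty, PySem.Dict.empty, PySem.Dict.empty)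

-- DFSUtil: visited[v] = True, then recurse on each unvisited neighbour.
-- 'for i in range(len(adj[v]))' with adj[v][i] over the unchanged list adj[v] is folded over that list;
-- 'not visited[n]' is KeyError for n outside visited's keys (Pre_ excludes reaching such n; the port skips).
-- Python recursion needs no fuel; here fuel = visited.size + 1 bounds the call depth (each level turns a
-- False entry True), so under Pre_ the fuel is never exhausted.
def dfsUtilA (adj : PySem.Dict Char (List Char)) :
    Nat → Char → PySem.Dict Char Bool → PySem.Dict Char Bool
  | 0, _, visited => visited
  | fuel+1, v, visited =>
    (adj.getD v []).foldl
      (fun vis n => if vis.get? n = some false then dfsUtilA adj fuel n vis else vis)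
      (visited.insert v true)

-- one early-return check loop of isEulerianCycle (used twice, as in the Python)
def checkA (adj : PySem.Dict Char (List Char)) (visited : PySem.Dict Char Bool)
    (inp : PySem.Dict Char Int) : Bool :=
  adj.keys.all (fun i =>
    !(decide (0 < (adj.getD i []).length) && ((visited.get? i).getD true == false))
    && (((adj.getD i []).length : Int) == inp.getD i 0))

-- getTranspose: 'for v in adj.keys(): for i in range(len(adj[v]))' = fold over adj.items (keys are nodup,
-- adj[v] is the paired value), inner loop folded over that list
def getTransposeA (adj : PySem.Dict Char (List Char)) :
    PySem.Dict Char (List Char) × PySem.Dict Char Int × PySem.Dict Char Bool :=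
  adj.items.foldl (fun acc p =>
      p.2.foldl (fun acc2 n =>
          (acc2.1.modify n [] (· ++ [p.1]),
           acc2.2.1.modify p.1 0 (· + 1),
           acc2.2.2.insert n false))
        acc)
    (PySem.Dict.empty, PySem.Dict.empty, PySem.Dict.empty)

def isEulerianCycleA (start : Char) (visited : PySem.Dict Char Bool)
    (adj : PySem.Dict Char (List Char)) (inp : PySem.Dict Char Int) : Bool :=
  let visited1 := dfsUtilA adj (visited.size + 1) start visited
  if checkA adj visited1 inp then
    let t := getTransposeA adj
    -- list(new_adj.keys())[0]: nonempty under Pre_ (words ≠ []); headD's default is never read there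
    let nvis := dfsUtilA t.1 (t.2.2.size + 1) (t.1.keys.headD ' ') t.2.2
    checkA t.1 nvis t.2.1
  else false

def chainedWords (words : List String) : Bool :=
  match words with
  | [] => false  -- Python raises IndexError on words[0]; excluded by Pre_
  | w :: _ =>
    let b := buildA words
    isEulerianCycleA (pyFirst w) b.2.1 b.1 b.2.2

-- ===== PORT B =====
-- build loop of B: setdefault(...).append = modify _ [] (· ++ [·]); inp[x] = inp.get(x, 0) + 1
def buildB (words : List String) :
    PySem.Dict Char (List Char) × PySem.Dict Char Bool × PySem.Dict Char Int :=
  words.foldl (fun acc w =>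
      (acc.1.modify (pyFirst w) [] (· ++ [pyLast w]),
       acc.2.1.insert (pyFirst w) false,
       acc.2.2.insert (pyLast w) (acc.2.2.getD (pyLast w) 0 + 1)))
    (PySem.Dict.empty, PySem.Dict.empty, PySem.Dict.empty)

-- iterative DFS with an explicit stack: pop from the end = head of the list here, stack.extend(graph[v])
-- puts graph[v] reversed on top. 'not seen[v]' raises KeyError for a vertex outside seen's keys, exactly
-- as A's DFSUtil does (Pre_ excludes reaching such a vertex; the port skips it), and graph[v] is read only
-- for marked v, which is a key under Pre_. The while loop is fueled; sweepFuel bounds the iteration count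
-- (each step pops one entry and pushes only when a False entry turns True), so fuel is never exhausted.
def sweepB (graph : PySem.Dict Char (List Char)) :
    Nat → List Char → PySem.Dict Char Bool → PySem.Dict Char Bool
  | 0, _, seen => seen
  | fuel+1, stack, seen =>
    match stack with
    | [] => seen
    | v :: rest =>
      if seen.get? v = some false then
        sweepB graph fuel ((graph.getD v []).reverse ++ rest) (seen.insert v true)
      else
        sweepB graph fuel rest seen

def sweepFuel (g : PySem.Dict Char (List Char)) : Nat :=
  g.size + (g.values.map List.length).sum + 2

-- all(seen[v] and len(outs) == indeg.get(v, 0) for v, outs in graph.items())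
def balancedB (graph : PySem.Dict Char (List Char)) (seen : PySem.Dict Char Bool)
    (indeg : PySem.Dict Char Int) : Bool :=
  graph.items.all (fun p =>
    ((seen.get? p.1).getD true) && (((p.2.length : Int)) == indeg.getD p.1 0))

-- B's transpose loop: for v, outs in adj.items(): for n in outs: ...
def transposeB (adj : PySem.Dict Char (List Char)) :
    PySem.Dict Char (List Char) × PySem.Dict Char Int × PySem.Dict Char Bool :=
  adj.items.foldl (fun acc p =>
      p.2.foldl (fun acc2 n =>
          (acc2.1.modify n [] (· ++ [p.1]),
           acc2.2.1.insert p.1 (acc2.2.1.getD p.1 0 + 1),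
           acc2.2.2.insert n false))
        acc)
    (PySem.Dict.empty, PySem.Dict.empty, PySem.Dict.empty)

def chainedWords_alt (words : List String) : Bool :=
  match words with
  | [] => false  -- words[0] raises IndexError in B too
  | w :: _ =>
    let b := buildB words
    let vis1 := sweepB b.1 (sweepFuel b.1) [pyFirst w] b.2.1
    if balancedB b.1 vis1 b.2.2 then
      let t := transposeB b.1
      let rvis := sweepB t.1 (sweepFuel t.1) [pyLast w] t.2.2
      balancedB t.1 rvis t.2.1
    else false

-- ===== PRECONDITION & SPEC =====
-- reachIter computes the transitive closure (bounded fixpoint) of the first-letter → last-letter relation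
-- restricted to first letters: a property of the input graph, not a copy of either port's traversal.
def reachIter (pairs : List (Char × Char)) (F : List Char) : Nat → List Char → List Char
  | 0, S => S
  | n+1, S =>
    reachIter pairs F n
      (PySem.Set.update S
        (((pairs.filter (fun p => decide (p.1 ∈ S))).map (·.2)).filter (fun c => decide (c ∈ F))))

-- Pre_ excludes exactly the inputs on which the Python A raises: the empty list and empty strings
-- (IndexError), and word lists whose chain, followed from words[0][0], reaches a last letter that is
-- never a first letter (KeyError on visited[...] in DFSUtil).
def Pre_chainedWords (words : List String) : Prop :=
  words ≠ [] ∧ (∀ w ∈ words, w ≠ "") ∧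
  (∀ p ∈ words.map (fun w => (pyFirst w, pyLast w)),
      p.1 ∈ reachIter (words.map (fun w => (pyFirst w, pyLast w)))
              (words.map pyFirst) words.length [pyFirst (words.headD "")] →
      p.2 ∈ words.map pyFirst)
instance (words : List String) : Decidable (Pre_chainedWords words) := by
  unfold Pre_chainedWords; infer_instance

def pvWitness_chainedWords : List String := ["ab", "bc", "ca"]

def Spec_chainedWords (words : List String) (out : Bool) : Prop := out = chainedWords_alt words
instance (words : List String) (out : Bool) : Decidable (Spec_chainedWords words out) := by
  unfold Spec_chainedWords; infer_instance

-- ===== CLAIM (what is proved, stated in full; the proofs are below) =====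
def Claim_equal_chainedWords : Prop :=
  ∀ (words : List String), Dom_chainedWords words → Pre_chainedWords words →
    Spec_chainedWords words (chainedWords words)

-- ===== LEMMAS AND PROOFS =====

-- ---- generic list lemmas ----

theorem pvFoldlTriple {α β γ δ : Type} (l : List α) (f : β → α → β) (g : γ → α → γ)
    (h : δ → α → δ) : ∀ (acc : β × γ × δ),
    l.foldl (fun acc x => (f acc.1 x, g acc.2.1 x, h acc.2.2 x)) acc
      = (l.foldl f acc.1, l.foldl g acc.2.1, l.foldl h acc.2.2) := by
  induction l with
  | nil => intro acc; rfl
  | cons x xs ih => intro acc; simp only [List.foldl_cons]; exact ih _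

theorem pvFoldlFoldlFlatMap {α β γ : Type} (l : List α) (F : α → List β) (g : γ → β → γ) :
    ∀ (a : γ), l.foldl (fun acc x => (F x).foldl g acc) a = (l.flatMap F).foldl g a := by
  induction l with
  | nil => intro a; rfl
  | cons x xs ih => intro a; simp only [List.foldl_cons, List.flatMap_cons, List.foldl_append]; exact ih _

theorem pvFilterLenLe {α : Type} (l : List α) (p q : α → Bool)
    (hpq : ∀ x, q x = true → p x = true) :
    (l.filter q).length ≤ (l.filter p).length := by
  induction l with
  | nil => simp
  | cons x xs ih =>
    by_cases hq : q x = true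
    · simp [hq, hpq x hq]; omega
    · simp only [Bool.not_eq_true] at hq
      by_cases hp : p x = true
      · simp [hq, hp]; omega
      · simp only [Bool.not_eq_true] at hp
        simp [hq, hp, ih]

theorem pvFilterLenLt {α : Type} (l : List α) (p q : α → Bool) (v : α)
    (hpq : ∀ x, q x = true → p x = true) (hv : v ∈ l) (hpv : p v = true) (hqv : q v = false) :
    (l.filter q).length < (l.filter p).length := by
  induction l with
  | nil => cases hv
  | cons x xs ih =>
    rcases List.mem_cons.mp hv with hv | hv
    · subst hv
      simp only [List.filter_cons, hqv, hpv]
      simp only [if_true, List.length_cons]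
      exact Nat.lt_succ_of_le (pvFilterLenLe xs p q hpq)
    · by_cases hq : q x = true
      · simp only [List.filter_cons, hq, hpq x hq, if_true, List.length_cons]
        exact Nat.succ_lt_succ (ih hv)
      · simp only [Bool.not_eq_true] at hq
        by_cases hp : p x = true
        · simp only [List.filter_cons, hq, hp, if_true, List.length_cons]
          exact Nat.lt_succ_of_lt (ih hv)
        · simp only [Bool.not_eq_true] at hp
          simp [hq, hp]
          exact ih hv

theorem pvSumFilterLe {α : Type} (l : List α) (p q : α → Bool) (f : α → Nat)
    (hpq : ∀ x, q x = true → p x = true) :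
    ((l.filter q).map f).sum ≤ ((l.filter p).map f).sum := by
  induction l with
  | nil => simp
  | cons x xs ih =>
    by_cases hq : q x = true
    · simp [hq, hpq x hq]; omega
    · simp only [Bool.not_eq_true] at hq
      by_cases hp : p x = true
      · simp [hq, hp]; omega
      · simp only [Bool.not_eq_true] at hp
        simp [hq, hp, ih]

theorem pvSumFilterLt {α : Type} [DecidableEq α] (l : List α) (p q : α → Bool) (f : α → Nat)
    (v : α) (hpq : ∀ x, q x = true → p x = true) (hv : v ∈ l) (hpv : p v = true)
    (hqv : q v = false) :
    ((l.filter q).map f).sum + f v ≤ ((l.filter p).map f).sum := by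
  induction l with
  | nil => cases hv
  | cons x xs ih =>
    by_cases hxv : x = v
    · subst hxv
      simp [hqv, hpv]
      have := pvSumFilterLe xs p q f hpq
      omega
    · have hv : v ∈ xs := by
        rcases List.mem_cons.mp hv with h | h
        · exact absurd h.symm hxv
        · exact h
      by_cases hq : q x = true
      · simp [hq, hpq x hq]
        have := ih hv; omega
      · simp only [Bool.not_eq_true] at hq
        by_cases hp : p x = true
        · simp [hq, hp]
          have := ih hv; omega
        · simp only [Bool.not_eq_true] at hp
          simp [hq, hp]
          exact ih hv

-- ---- marks / reachability abstractions ----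

def mkT (vis : PySem.Dict Char Bool) (c : Char) : Prop := vis.get? c = some true

def StepR (E : PySem.Dict Char (List Char)) (vis0 : PySem.Dict Char Bool) (x y : Char) : Prop :=
  y ∈ E.getD x [] ∧ vis0.get? y = some false

def ReachR (E : PySem.Dict Char (List Char)) (vis0 : PySem.Dict Char Bool) : Char → Char → Prop :=
  Relation.ReflTransGen (StepR E vis0)

def valrel (a b : PySem.Dict Char Bool) : Prop :=
  b.keys = a.keys ∧ ∀ x, b.get? x = a.get? x ∨ (a.get? x = some false ∧ b.get? x = some true)

def fcD (d : PySem.Dict Char Bool) : Nat :=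
  (d.keys.filter (fun k => d.get? k == some false)).length

def wtD (E : PySem.Dict Char (List Char)) (d : PySem.Dict Char Bool) : Nat :=
  ((d.keys.filter (fun k => d.get? k == some false)).map (fun k => 1 + (E.getD k []).length)).sum

theorem valrel_refl (a : PySem.Dict Char Bool) : valrel a a := ⟨rfl, fun _ => Or.inl rfl⟩

theorem valrel_trans {a b c : PySem.Dict Char Bool} (h1 : valrel a b) (h2 : valrel b c) :
    valrel a c := by
  refine ⟨h2.1.trans h1.1, fun x => ?_⟩
  rcases h2.2 x with h | ⟨hb, hc⟩
  · rcases h1.2 x with h' | ⟨ha, hb⟩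
    · exact Or.inl (h.trans h')
    · exact Or.inr ⟨ha, h.trans hb⟩
  · rcases h1.2 x with h' | ⟨ha, hb'⟩
    · exact Or.inr ⟨h' ▸ hb, hc⟩
    · exact Or.inr ⟨ha, hc⟩

theorem valrel_insert {a : PySem.Dict Char Bool} {v : Char} (h : a.get? v = some false) :
    valrel a (a.insert v true) := by
  have hc : a.contains v = true := by
    rw [PySem.Dict.contains_eq_isSome_get?, h]; rfl
  refine ⟨PySem.Dict.keys_insert_of_contains _ _ hc, fun x => ?_⟩
  rw [PySem.Dict.get?_insert]
  by_cases hx : x = v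
  · subst hx; exact Or.inr ⟨h, by simp⟩
  · simp [hx]

theorem valrel_get?_false {a b : PySem.Dict Char Bool} (h : valrel a b) {x : Char}
    (hb : b.get? x = some false) : a.get? x = some false := by
  rcases h.2 x with h' | ⟨ha, hb'⟩
  · exact h' ▸ hb
  · rw [hb'] at hb; cases hb

theorem valrel_mkT {a b : PySem.Dict Char Bool} (h : valrel a b) {x : Char}
    (ha : mkT a x) : mkT b x := by
  rcases h.2 x with h' | ⟨_, hb⟩
  · unfold mkT at ha ⊢; rw [h', ha]
  · exact hb

theorem reach_mono {E : PySem.Dict Char (List Char)} {a b : PySem.Dict Char Bool}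
    (h : valrel a b) {x y : Char} (hr : ReachR E b x y) : ReachR E a x y :=
  Relation.ReflTransGen.mono (fun _ _ hs => ⟨hs.1, valrel_get?_false h hs.2⟩) hr

theorem fcD_le_of_valrel {a b : PySem.Dict Char Bool} (h : valrel a b) : fcD b ≤ fcD a := by
  unfold fcD
  rw [h.1]
  exact pvFilterLenLe _ _ _ (fun x hx => by
    have : b.get? x = some false := by simpa using hx
    simpa using valrel_get?_false h this)

theorem mem_keys_of_get?_false {d : PySem.Dict Char Bool} {v : Char}
    (h : d.get? v = some false) : v ∈ d.keys := by
  rw [← PySem.Dict.contains_iff_mem_keys]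
  rw [PySem.Dict.contains_eq_isSome_get?, h]; rfl

theorem fcD_lt_insert {a : PySem.Dict Char Bool} {v : Char} (h : a.get? v = some false) :
    fcD (a.insert v true) < fcD a := by
  unfold fcD
  rw [(valrel_insert h).1]
  apply pvFilterLenLt _ _ _ v
  · intro x hx
    have hx' : (a.insert v true).get? x = some false := by simpa using hx
    simpa using valrel_get?_false (valrel_insert h) hx'
  · exact mem_keys_of_get?_false h
  · simpa using h
  · simp []

theorem wtD_insert {E : PySem.Dict Char (List Char)} {a : PySem.Dict Char Bool} {v : Char}
    (h : a.get? v = some false) :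
    wtD E (a.insert v true) + (1 + (E.getD v []).length) ≤ wtD E a := by
  unfold wtD
  rw [(valrel_insert h).1]
  apply pvSumFilterLt _ _ _ _ v
  · intro x hx
    have hx' : (a.insert v true).get? x = some false := by simpa using hx
    simpa using valrel_get?_false (valrel_insert h) hx'
  · exact mem_keys_of_get?_false h
  · simpa using h
  · simp []

-- the master characterisation: a DFS result that is value-monotone, sound, closed and marks the
-- start marks exactly the initially-marked vertices plus those reachable through False entries
theorem masterLem (E : PySem.Dict Char (List Char)) (vis0 res : PySem.Dict Char Bool) (s : Char)
    (Hval : valrel vis0 res) (Hs : mkT res s) (Hs0 : vis0.get? s = some false)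
    (Hsnd : ∀ x, mkT res x → mkT vis0 x ∨ ReachR E vis0 s x)
    (Hcl : ∀ x, mkT res x → vis0.get? x = some false →
        ∀ y ∈ E.getD x [], res.get? y ≠ some false) :
    ∀ x, mkT res x ↔ (mkT vis0 x ∨ ReachR E vis0 s x) := by
  intro x
  constructor
  · exact Hsnd x
  · rintro (h | h)
    · exact valrel_mkT Hval h
    · -- path induction carrying "marked in res and False in vis0"
      have key : ∀ c, ReachR E vis0 s c → mkT res c ∧ vis0.get? c = some false := by
        intro c hc
        induction hc with
        | refl => exact ⟨Hs, Hs0⟩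
        | tail _ hstep ih =>
          rename_i b c hsb
          have h1 := Hcl b ih.1 ih.2 c hstep.1
          rcases Hval.2 c with hv | ⟨_, hv⟩
          · rw [hstep.2] at hv; exact absurd hv h1
          · exact ⟨hv, hstep.2⟩
      exact (key x h).1

-- ---- A-side: the recursive DFS satisfies the master hypotheses ----

theorem foldA_val (E : PySem.Dict Char (List Char)) (fuel : Nat)
    (IH : ∀ v vis, vis.get? v = some false → valrel vis (dfsUtilA E fuel v vis)) :
    ∀ (ns : List Char) (vis : PySem.Dict Char Bool),
      valrel vis (ns.foldl
        (fun vis n => if vis.get? n = some false then dfsUtilA E fuel n vis else vis) vis) := by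
  intro ns
  induction ns with
  | nil => intro vis; exact valrel_refl _
  | cons n ns ih =>
    intro vis
    simp only [List.foldl_cons]
    by_cases h : vis.get? n = some false
    · rw [if_pos h]; exact valrel_trans (IH n vis h) (ih _)
    · rw [if_neg h]; exact ih _

theorem A_val (E : PySem.Dict Char (List Char)) :
    ∀ (fuel : Nat) (v : Char) (vis : PySem.Dict Char Bool), vis.get? v = some false →
      valrel vis (dfsUtilA E fuel v vis) := by
  intro fuel
  induction fuel with
  | zero => intro v vis _; exact valrel_refl _
  | succ f ih =>
    intro v vis h
    exact valrel_trans (valrel_insert h) (foldA_val E f ih _ _)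

theorem A_marks (E : PySem.Dict Char (List Char)) (fuel : Nat) (v : Char)
    (vis : PySem.Dict Char Bool) (hf : 0 < fuel) : mkT (dfsUtilA E fuel v vis) v := by
  obtain ⟨f, rfl⟩ : ∃ f, fuel = f + 1 := ⟨fuel - 1, by omega⟩
  have h1 : mkT (vis.insert v true) v := by
    unfold mkT; simp []
  exact valrel_mkT (foldA_val E f (fun v vis h => A_val E f v vis h) _ _) h1

theorem foldA_snd (E : PySem.Dict Char (List Char)) (fuel : Nat)
    (IH : ∀ v vis, vis.get? v = some false → ∀ x, mkT (dfsUtilA E fuel v vis) x →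
        mkT vis x ∨ ReachR E vis v x) :
    ∀ (ns : List Char) (vis : PySem.Dict Char Bool) (x : Char),
      mkT (ns.foldl
        (fun vis n => if vis.get? n = some false then dfsUtilA E fuel n vis else vis) vis) x →
      mkT vis x ∨ ∃ n ∈ ns, vis.get? n = some false ∧ ReachR E vis n x := by
  intro ns
  induction ns with
  | nil => intro vis x hx; exact Or.inl hx
  | cons n ns ih =>
    intro vis x hx
    simp only [List.foldl_cons] at hx
    by_cases h : vis.get? n = some false
    · rw [if_pos h] at hx
      have hval := A_val E fuel n vis h
      rcases ih _ x hx with h1 | ⟨m, hm, h1, hr⟩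
      · rcases IH n vis h x h1 with h2 | h2
        · exact Or.inl h2
        · exact Or.inr ⟨n, List.mem_cons_self, h, h2⟩
      · exact Or.inr ⟨m, List.mem_cons_of_mem _ hm,
          valrel_get?_false hval h1, reach_mono hval hr⟩
    · rw [if_neg h] at hx
      rcases ih _ x hx with h1 | ⟨m, hm, h1, hr⟩
      · exact Or.inl h1
      · exact Or.inr ⟨m, List.mem_cons_of_mem _ hm, h1, hr⟩

theorem A_snd (E : PySem.Dict Char (List Char)) :
    ∀ (fuel : Nat) (v : Char) (vis : PySem.Dict Char Bool), vis.get? v = some false →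
      ∀ x, mkT (dfsUtilA E fuel v vis) x → mkT vis x ∨ ReachR E vis v x := by
  intro fuel
  induction fuel with
  | zero => intro v vis _ x hx; exact Or.inl hx
  | succ f ih =>
    intro v vis h x hx
    rcases foldA_snd E f ih (E.getD v []) (vis.insert v true) x hx with h1 | ⟨n, hn, h1, hr⟩
    · by_cases hxv : x = v
      · subst hxv; exact Or.inr Relation.ReflTransGen.refl
      · left; unfold mkT at h1 ⊢
        rw [PySem.Dict.get?_insert, if_neg hxv] at h1; exact h1
    · have hnv : n ≠ v := by
        intro e; subst e; rw [PySem.Dict.get?_insert, if_pos rfl] at h1; cases h1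
      have h2 : vis.get? n = some false := by
        rw [PySem.Dict.get?_insert, if_neg hnv] at h1; exact h1
      exact Or.inr (Relation.ReflTransGen.head ⟨hn, h2⟩ (reach_mono (valrel_insert h) hr))

theorem fcD_pos {vis : PySem.Dict Char Bool} {v : Char} (h : vis.get? v = some false) :
    0 < fcD vis := by
  unfold fcD
  have hm : v ∈ vis.keys.filter (fun k => vis.get? k == some false) :=
    List.mem_filter.mpr ⟨mem_keys_of_get?_false h, by simp [h]⟩
  exact List.length_pos_of_mem hm

theorem foldA_cl (E : PySem.Dict Char (List Char)) (fuel : Nat)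
    (IHcl : ∀ v vis, fcD vis < fuel → vis.get? v = some false →
        ∀ x, mkT (dfsUtilA E fuel v vis) x → mkT vis x ∨
          ∀ y ∈ E.getD x [], (dfsUtilA E fuel v vis).get? y ≠ some false) :
    ∀ (ns : List Char) (vis : PySem.Dict Char Bool), fcD vis < fuel →
      (∀ x, mkT (ns.foldl
          (fun vis n => if vis.get? n = some false then dfsUtilA E fuel n vis else vis) vis) x →
        mkT vis x ∨ ∀ y ∈ E.getD x [],
          (ns.foldl (fun vis n => if vis.get? n = some false then dfsUtilA E fuel n vis else vis)
            vis).get? y ≠ some false)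
      ∧ (∀ n ∈ ns,
          (ns.foldl (fun vis n => if vis.get? n = some false then dfsUtilA E fuel n vis else vis)
            vis).get? n ≠ some false) := by
  intro ns
  induction ns with
  | nil =>
    intro vis _
    exact ⟨fun x hx => Or.inl hx, fun n hn => absurd hn List.not_mem_nil⟩
  | cons n ns ih =>
    intro vis hfc
    by_cases h : vis.get? n = some false
    · simp only [List.foldl_cons, if_pos h]
      have hval1 := A_val E fuel n vis h
      have hfc1 : fcD (dfsUtilA E fuel n vis) < fuel :=
        lt_of_le_of_lt (fcD_le_of_valrel hval1) hfc
      obtain ⟨P, Q⟩ := ih (dfsUtilA E fuel n vis) hfc1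
      have hvalrest := foldA_val E fuel (fun v vis h => A_val E fuel v vis h) ns
        (dfsUtilA E fuel n vis)
      constructor
      · intro x hx
        rcases P x hx with h1 | h1
        · rcases IHcl n vis hfc h x h1 with h2 | h2
          · exact Or.inl h2
          · right; intro y hy hcon
            exact h2 y hy (valrel_get?_false hvalrest hcon)
        · exact Or.inr h1
      · intro m hm
        rcases List.mem_cons.mp hm with hm | hm
        · subst hm
          have h1 : mkT (dfsUtilA E fuel m vis) m :=
            A_marks E fuel m vis (lt_of_le_of_lt (Nat.zero_le _) hfc)
          have h2 := valrel_mkT hvalrest h1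
          unfold mkT at h2; rw [h2]; simp
        · exact Q m hm
    · simp only [List.foldl_cons, if_neg h]
      obtain ⟨P, Q⟩ := ih vis hfc
      refine ⟨P, fun m hm => ?_⟩
      rcases List.mem_cons.mp hm with hm | hm
      · subst hm
        intro hcon
        exact h (valrel_get?_false (foldA_val E fuel (fun v vis h => A_val E fuel v vis h) ns vis)
          hcon)
      · exact Q m hm

theorem A_cl (E : PySem.Dict Char (List Char)) :
    ∀ (fuel : Nat) (v : Char) (vis : PySem.Dict Char Bool), fcD vis < fuel →
      vis.get? v = some false →
      ∀ x, mkT (dfsUtilA E fuel v vis) x → mkT vis x ∨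
        ∀ y ∈ E.getD x [], (dfsUtilA E fuel v vis).get? y ≠ some false := by
  intro fuel
  induction fuel with
  | zero => intro v vis hfc _; omega
  | succ f ihf =>
    intro v vis hfc h x hx
    have hfc' : fcD (vis.insert v true) < f := by
      have h1 := fcD_lt_insert h
      have h2 := fcD_pos h
      omega
    obtain ⟨P, Q⟩ := foldA_cl E f ihf (E.getD v []) (vis.insert v true) hfc'
    rcases P x hx with h1 | h1
    · by_cases hxv : x = v
      · subst hxv; exact Or.inr Q
      · left; unfold mkT at h1 ⊢
        rw [PySem.Dict.get?_insert, if_neg hxv] at h1; exact h1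
    · exact Or.inr h1

-- ---- B-side: the explicit-stack DFS satisfies the master hypotheses ----

theorem B_val (E : PySem.Dict Char (List Char)) :
    ∀ (fuel : Nat) (stack : List Char) (vis : PySem.Dict Char Bool),
      valrel vis (sweepB E fuel stack vis) := by
  intro fuel
  induction fuel with
  | zero => intro stack vis; exact valrel_refl _
  | succ f ih =>
    intro stack vis
    match stack with
    | [] => exact valrel_refl _
    | v :: rest =>
      show valrel vis (if vis.get? v = some false then _ else _)
      by_cases h : vis.get? v = some false
      · rw [if_pos h]; exact valrel_trans (valrel_insert h) (ih _ _)
      · rw [if_neg h]; exact ih _ _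

theorem B_snd (E : PySem.Dict Char (List Char)) :
    ∀ (fuel : Nat) (stack : List Char) (vis : PySem.Dict Char Bool) (x : Char),
      mkT (sweepB E fuel stack vis) x →
      mkT vis x ∨ ∃ v ∈ stack, vis.get? v = some false ∧ ReachR E vis v x := by
  intro fuel
  induction fuel with
  | zero => intro stack vis x hx; exact Or.inl hx
  | succ f ih =>
    intro stack vis x hx
    match stack, hx with
    | [], hx => exact Or.inl hx
    | v :: rest, hx =>
      by_cases h : vis.get? v = some false
      · rw [show sweepB E (f+1) (v :: rest) vis
            = sweepB E f ((E.getD v []).reverse ++ rest) (vis.insert v true) from by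
              simp [sweepB, h]] at hx
        rcases ih _ _ x hx with h1 | ⟨u, hu, h1, hr⟩
        · by_cases hxv : x = v
          · subst hxv
            exact Or.inr ⟨x, List.mem_cons_self, h, Relation.ReflTransGen.refl⟩
          · left; unfold mkT at h1 ⊢
            rw [PySem.Dict.get?_insert, if_neg hxv] at h1; exact h1
        · have hnv : u ≠ v := by
            intro e; subst e; rw [PySem.Dict.get?_insert, if_pos rfl] at h1; cases h1
          have h2 : vis.get? u = some false := by
            rw [PySem.Dict.get?_insert, if_neg hnv] at h1; exact h1
          have hr' : ReachR E vis u x := reach_mono (valrel_insert h) hr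
          rcases List.mem_append.mp hu with hu | hu
          · exact Or.inr ⟨v, List.mem_cons_self, h,
              Relation.ReflTransGen.head ⟨List.mem_reverse.mp hu, h2⟩ hr'⟩
          · exact Or.inr ⟨u, List.mem_cons_of_mem _ hu, h2, hr'⟩
      · rw [show sweepB E (f+1) (v :: rest) vis = sweepB E f rest vis from by
              simp [sweepB, h]] at hx
        rcases ih _ _ x hx with h1 | ⟨u, hu, h1, hr⟩
        · exact Or.inl h1
        · exact Or.inr ⟨u, List.mem_cons_of_mem _ hu, h1, hr⟩

theorem B_marks (E : PySem.Dict Char (List Char)) (fuel : Nat) (s : Char)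
    (vis : PySem.Dict Char Bool) (hf : 0 < fuel) (hs : vis.get? s = some false) :
    mkT (sweepB E fuel [s] vis) s := by
  obtain ⟨f, rfl⟩ : ∃ f, fuel = f + 1 := ⟨fuel - 1, by omega⟩
  rw [show sweepB E (f+1) [s] vis
      = sweepB E f ((E.getD s []).reverse ++ []) (vis.insert s true) from by simp [sweepB, hs]]
  exact valrel_mkT (B_val E f _ _) (by unfold mkT; simp [])

theorem B_cl (E : PySem.Dict Char (List Char)) :
    ∀ (fuel : Nat) (stack : List Char) (vis : PySem.Dict Char Bool),
      stack.length + wtD E vis < fuel →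
      (∀ x, mkT vis x → ∀ y ∈ E.getD x [], vis.get? y ≠ some false ∨ y ∈ stack) →
      ∀ x, mkT (sweepB E fuel stack vis) x →
        ∀ y ∈ E.getD x [], (sweepB E fuel stack vis).get? y ≠ some false := by
  intro fuel
  induction fuel with
  | zero => intro stack vis hfc _; omega
  | succ f ih =>
    intro stack vis hfc hJ
    match stack, hfc with
    | [], _ =>
      intro x hx y hy
      rcases hJ x hx y hy with h | h
      · exact h
      · exact absurd h List.not_mem_nil
    | v :: rest, hfc =>
      by_cases h : vis.get? v = some false
      · rw [show sweepB E (f+1) (v :: rest) vis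
            = sweepB E f ((E.getD v []).reverse ++ rest) (vis.insert v true) from by
              simp [sweepB, h]]
        apply ih
        · have h1 := wtD_insert (E := E) h
          simp only [List.length_append, List.length_reverse, List.length_cons] at hfc ⊢
          omega
        · intro x hx y hy
          by_cases hxv : x = v
          · subst hxv
            exact Or.inr (List.mem_append.mpr (Or.inl (List.mem_reverse.mpr hy)))
          · have hx' : mkT vis x := by
              unfold mkT at hx ⊢; rw [PySem.Dict.get?_insert, if_neg hxv] at hx; exact hx
            rcases hJ x hx' y hy with h1 | h1
            · left
              by_cases hyv : y = v
              · subst hyv; rw [PySem.Dict.get?_insert, if_pos rfl]; simp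
              · rw [PySem.Dict.get?_insert, if_neg hyv]; exact h1
            · rcases List.mem_cons.mp h1 with h1 | h1
              · subst h1; left; rw [PySem.Dict.get?_insert, if_pos rfl]; simp
              · exact Or.inr (List.mem_append.mpr (Or.inr h1))
      · rw [show sweepB E (f+1) (v :: rest) vis = sweepB E f rest vis from by simp [sweepB, h]]
        apply ih
        · simp only [List.length_cons] at hfc; omega
        · intro x hx y hy
          rcases hJ x hx y hy with h1 | h1
          · exact Or.inl h1
          · rcases List.mem_cons.mp h1 with h1 | h1
            · subst h1; exact Or.inl h
            · exact Or.inr h1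

theorem pvSumOnePlus (l : List Char) (f : Char → Nat) :
    (l.map (fun k => 1 + f k)).sum = l.length + (l.map f).sum := by
  induction l with
  | nil => rfl
  | cons x xs ih => simp [ih]; omega

theorem keys_length_eq_size (d : PySem.Dict Char Bool) : d.keys.length = d.size := by
  simp [PySem.Dict.keys, PySem.Dict.size]

-- the two DFS implementations compute pointwise-equal visited maps
theorem phase_eq (E : PySem.Dict Char (List Char)) (vis0 : PySem.Dict Char Bool) (s : Char)
    (hkeys : vis0.keys = E.keys) (hnd : E.keys.Nodup)
    (h0 : ∀ x, vis0.get? x = none ∨ vis0.get? x = some false)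
    (hs : vis0.get? s = some false) :
    ∀ x, (dfsUtilA E (vis0.size + 1) s vis0).get? x
        = (sweepB E (sweepFuel E) [s] vis0).get? x := by
  have hfA : fcD vis0 < vis0.size + 1 := by
    have h1 : fcD vis0 ≤ vis0.keys.length := List.length_filter_le _ _
    rw [keys_length_eq_size] at h1; omega
  have hfB : 1 + wtD E vis0 < sweepFuel E := by
    have h1 : wtD E vis0 ≤ (vis0.keys.map (fun k => 1 + (E.getD k []).length)).sum := by
      unfold wtD
      have h2 := pvSumFilterLe vis0.keys (fun _ => true)
        (fun k => vis0.get? k == some false) (fun k => 1 + (E.getD k []).length) (by simp)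
      simpa using h2
    rw [hkeys, pvSumOnePlus] at h1
    have h3 : (E.keys.map (fun k => (E.getD k []).length)).sum
        = (E.values.map List.length).sum := by
      rw [PySem.Dict.values_eq_map_keys E hnd [], List.map_map]; rfl
    have h4 : E.keys.length = E.size := by simp [PySem.Dict.keys, PySem.Dict.size]
    rw [h3, h4] at h1
    unfold sweepFuel; omega
  have hvalA := A_val E (vis0.size + 1) s vis0 hs
  have hvalB := B_val E (sweepFuel E) [s] vis0
  have hmA : ∀ x, mkT (dfsUtilA E (vis0.size + 1) s vis0) x
      ↔ (mkT vis0 x ∨ ReachR E vis0 s x) := by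
    apply masterLem E vis0 _ s hvalA (A_marks E _ s vis0 (by omega)) hs (A_snd E _ s vis0 hs)
    intro x hx hfx y hy
    rcases A_cl E (vis0.size + 1) s vis0 hfA hs x hx with h1 | h1
    · unfold mkT at h1; rw [h1] at hfx; cases hfx
    · exact h1 y hy
  have hmB : ∀ x, mkT (sweepB E (sweepFuel E) [s] vis0) x
      ↔ (mkT vis0 x ∨ ReachR E vis0 s x) := by
    apply masterLem E vis0 _ s hvalB (B_marks E _ s vis0 (by unfold sweepFuel; omega) hs) hs
    · intro x hx
      rcases B_snd E _ [s] vis0 x hx with h1 | ⟨v, hv, h1, hr⟩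
      · exact Or.inl h1
      · rcases List.mem_singleton.mp hv with rfl
        exact Or.inr hr
    · intro x hx hfx y hy
      apply B_cl E (sweepFuel E) [s] vis0 (by simpa using hfB) _ x hx y hy
      intro z hz
      rcases h0 z with h1 | h1 <;> unfold mkT at hz <;> rw [h1] at hz <;> cases hz
  intro x
  rcases h0 x with h | h
  · rcases hvalA.2 x with ha | ⟨ha, _⟩
    · rcases hvalB.2 x with hb | ⟨hb, _⟩
      · rw [ha, hb]
      · rw [hb] at h; cases h
    · rw [ha] at h; cases h
  · by_cases hA : mkT (dfsUtilA E (vis0.size + 1) s vis0) x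
    · have hB := (hmB x).mpr ((hmA x).mp hA)
      unfold mkT at hA hB; rw [hA, hB]
    · have hB : ¬ mkT (sweepB E (sweepFuel E) [s] vis0) x := fun hb => hA ((hmA x).mpr ((hmB x).mp hb))
      have ha : (dfsUtilA E (vis0.size + 1) s vis0).get? x = some false := by
        rcases hvalA.2 x with h1 | ⟨_, h1⟩
        · rw [h1, h]
        · exact absurd h1 hA
      have hb : (sweepB E (sweepFuel E) [s] vis0).get? x = some false := by
        rcases hvalB.2 x with h1 | ⟨_, h1⟩
        · rw [h1, h]
        · exact absurd h1 hB
      rw [ha, hb]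

-- ---- construction layer: the dictionaries both ports build ----

def pairsOf (words : List String) : List (Char × Char) :=
  words.map (fun w => (pyFirst w, pyLast w))

def adjF (words : List String) : PySem.Dict Char (List Char) :=
  words.foldl (fun d w => d.modify (pyFirst w) [] (· ++ [pyLast w])) PySem.Dict.empty

def visF (words : List String) : PySem.Dict Char Bool :=
  words.foldl (fun d w => d.insert (pyFirst w) false) PySem.Dict.empty

def inpAF (words : List String) : PySem.Dict Char Int :=
  words.foldl (fun d w => d.modify (pyLast w) 0 (· + 1)) PySem.Dict.empty

def inpBF (words : List String) : PySem.Dict Char Int :=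
  words.foldl (fun d w => d.insert (pyLast w) (d.getD (pyLast w) 0 + 1)) PySem.Dict.empty

theorem buildA_eq (words : List String) : buildA words = (adjF words, visF words, inpAF words) := by
  unfold buildA adjF visF inpAF
  exact pvFoldlTriple words
    (fun (d : PySem.Dict Char (List Char)) w => d.modify (pyFirst w) [] (· ++ [pyLast w]))
    (fun (d : PySem.Dict Char Bool) w => d.insert (pyFirst w) false)
    (fun (d : PySem.Dict Char Int) w => d.modify (pyLast w) 0 (· + 1))
    (PySem.Dict.empty, PySem.Dict.empty, PySem.Dict.empty)

theorem buildB_eq (words : List String) : buildB words = (adjF words, visF words, inpBF words) := by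
  unfold buildB adjF visF inpBF
  exact pvFoldlTriple words
    (fun (d : PySem.Dict Char (List Char)) w => d.modify (pyFirst w) [] (· ++ [pyLast w]))
    (fun (d : PySem.Dict Char Bool) w => d.insert (pyFirst w) false)
    (fun (d : PySem.Dict Char Int) w => d.insert (pyLast w) (d.getD (pyLast w) 0 + 1))
    (PySem.Dict.empty, PySem.Dict.empty, PySem.Dict.empty)

theorem adjF_getD (words : List String) (c : Char) :
    (adjF words).getD c [] = ((pairsOf words).filter (fun p => p.1 == c)).map (fun p => p.2) := by
  have h : adjF words
      = (pairsOf words).foldl (fun d p => d.modify p.1 [] (· ++ [p.2])) PySem.Dict.empty := by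
    unfold adjF pairsOf; rw [List.foldl_map]
  rw [h, PySem.Dict.getD_foldl_modify_append]
  simp [PySem.Dict.getD_empty]

theorem adjF_keys (words : List String) :
    (adjF words).keys = PySem.Set.ofList (words.map pyFirst) := by
  unfold adjF
  rw [PySem.Dict.keys_foldl_modify_key words pyFirst [] (fun _ w l => l ++ [pyLast w])]
  simp [PySem.Dict.keys_empty, PySem.Set.update_nil_left]

theorem genInsFold (cs : List Char) :
    ∀ (d : PySem.Dict Char Bool) (c : Char),
      (cs.foldl (fun d x => d.insert x false) d).get? c
        = if c ∈ cs then some false else d.get? c := by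
  induction cs with
  | nil => intro d c; simp
  | cons x xs ih =>
    intro d c
    simp only [List.foldl_cons]
    rw [ih]
    by_cases hm : c ∈ xs
    · simp [hm]
    · rw [if_neg hm, PySem.Dict.get?_insert]
      by_cases hx : c = x
      · simp [hx]
      · simp [hx, hm]

theorem visF_get? (words : List String) (c : Char) :
    (visF words).get? c = if c ∈ words.map pyFirst then some false else none := by
  have h : visF words
      = (words.map pyFirst).foldl (fun d x => d.insert x false) PySem.Dict.empty := by
    unfold visF; rw [List.foldl_map]
  rw [h, genInsFold]
  simp [PySem.Dict.get?_empty]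

theorem visF_keys (words : List String) :
    (visF words).keys = PySem.Set.ofList (words.map pyFirst) := by
  unfold visF
  rw [PySem.Dict.keys_foldl_insert_key words pyFirst (fun _ _ => false)]
  simp [PySem.Dict.keys_empty, PySem.Set.update_nil_left]

theorem inpAF_getD (words : List String) (c : Char) :
    (inpAF words).getD c 0 = ((words.map pyLast).count c : Int) := by
  have h : inpAF words
      = (words.map pyLast).foldl (fun d x => d.modify x 0 (· + 1)) PySem.Dict.empty := by
    unfold inpAF; rw [List.foldl_map]
  rw [h, PySem.Dict.getD_foldl_modify_add_one]
  simp [PySem.Dict.getD_empty]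

theorem inpBF_getD (words : List String) (c : Char) :
    (inpBF words).getD c 0 = ((words.map pyLast).count c : Int) := by
  have h : inpBF words
      = (words.map pyLast).foldl (fun d x => d.insert x (d.getD x 0 + 1)) PySem.Dict.empty := by
    unfold inpBF; rw [List.foldl_map]
  rw [h, PySem.Dict.getD_foldl_insert_add_one]
  simp [PySem.Dict.getD_empty]

-- ---- transpose layer ----

def pairs2Of (adj : PySem.Dict Char (List Char)) : List (Char × Char) :=
  adj.items.flatMap (fun p => p.2.map (fun n => (n, p.1)))

def tAdjF (adj : PySem.Dict Char (List Char)) : PySem.Dict Char (List Char) :=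
  (pairs2Of adj).foldl (fun d q => d.modify q.1 [] (· ++ [q.2])) PySem.Dict.empty

def tVisF (adj : PySem.Dict Char (List Char)) : PySem.Dict Char Bool :=
  (pairs2Of adj).foldl (fun d q => d.insert q.1 false) PySem.Dict.empty

def tInpAF (adj : PySem.Dict Char (List Char)) : PySem.Dict Char Int :=
  (pairs2Of adj).foldl (fun d q => d.modify q.2 0 (· + 1)) PySem.Dict.empty

def tInpBF (adj : PySem.Dict Char (List Char)) : PySem.Dict Char Int :=
  (pairs2Of adj).foldl (fun d q => d.insert q.2 (d.getD q.2 0 + 1)) PySem.Dict.empty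

theorem transposeA_split (adj : PySem.Dict Char (List Char)) :
    getTransposeA adj = (tAdjF adj, tInpAF adj, tVisF adj) := by
  unfold getTransposeA
  have h1 : adj.items.foldl (fun acc p =>
      p.2.foldl (fun acc2 n =>
          (acc2.1.modify n [] (· ++ [p.1]),
           acc2.2.1.modify p.1 0 (· + 1),
           acc2.2.2.insert n false)) acc)
      ((PySem.Dict.empty, PySem.Dict.empty, PySem.Dict.empty) :
        PySem.Dict Char (List Char) × PySem.Dict Char Int × PySem.Dict Char Bool)
      = adj.items.foldl (fun acc p =>
          (p.2.foldl (fun a n => a.modify n [] (· ++ [p.1])) acc.1,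
           p.2.foldl (fun a n => a.modify p.1 0 (· + 1)) acc.2.1,
           p.2.foldl (fun a n => a.insert n false) acc.2.2))
        (PySem.Dict.empty, PySem.Dict.empty, PySem.Dict.empty) :=
    PySem.List.foldl_congr_mem _ _ _ _ (fun acc p _ =>
      pvFoldlTriple p.2 (fun a n => a.modify n [] (· ++ [p.1]))
        (fun a n => a.modify p.1 0 (· + 1)) (fun a n => a.insert n false) acc)
  rw [h1]
  refine Eq.trans (pvFoldlTriple adj.items
    (fun (a : PySem.Dict Char (List Char)) p => p.2.foldl (fun a n => a.modify n [] (· ++ [p.1])) a)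
    (fun (a : PySem.Dict Char Int) p => p.2.foldl (fun a n => a.modify p.1 0 (· + 1)) a)
    (fun (a : PySem.Dict Char Bool) p => p.2.foldl (fun a n => a.insert n false) a)
    (PySem.Dict.empty, PySem.Dict.empty, PySem.Dict.empty)) ?_
  refine congrArg₂ _ ?_ (congrArg₂ _ ?_ ?_)
  · unfold tAdjF pairs2Of
    rw [← pvFoldlFoldlFlatMap]
    exact (PySem.List.foldl_congr_mem _ _ _ _ (fun acc p _ => by rw [List.foldl_map])).symm
  · unfold tInpAF pairs2Of
    rw [← pvFoldlFoldlFlatMap]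
    exact (PySem.List.foldl_congr_mem _ _ _ _ (fun acc p _ => by rw [List.foldl_map])).symm
  · unfold tVisF pairs2Of
    rw [← pvFoldlFoldlFlatMap]
    exact (PySem.List.foldl_congr_mem _ _ _ _ (fun acc p _ => by rw [List.foldl_map])).symm

theorem transposeB_split (adj : PySem.Dict Char (List Char)) :
    transposeB adj = (tAdjF adj, tInpBF adj, tVisF adj) := by
  unfold transposeB
  have h1 : adj.items.foldl (fun acc p =>
      p.2.foldl (fun acc2 n =>
          (acc2.1.modify n [] (· ++ [p.1]),
           acc2.2.1.insert p.1 (acc2.2.1.getD p.1 0 + 1),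
           acc2.2.2.insert n false)) acc)
      ((PySem.Dict.empty, PySem.Dict.empty, PySem.Dict.empty) :
        PySem.Dict Char (List Char) × PySem.Dict Char Int × PySem.Dict Char Bool)
      = adj.items.foldl (fun acc p =>
          (p.2.foldl (fun a n => a.modify n [] (· ++ [p.1])) acc.1,
           p.2.foldl (fun a n => a.insert p.1 (a.getD p.1 0 + 1)) acc.2.1,
           p.2.foldl (fun a n => a.insert n false) acc.2.2))
        (PySem.Dict.empty, PySem.Dict.empty, PySem.Dict.empty) :=
    PySem.List.foldl_congr_mem _ _ _ _ (fun acc p _ =>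
      pvFoldlTriple p.2 (fun a n => a.modify n [] (· ++ [p.1]))
        (fun a n => a.insert p.1 (a.getD p.1 0 + 1)) (fun a n => a.insert n false) acc)
  rw [h1]
  refine Eq.trans (pvFoldlTriple adj.items
    (fun (a : PySem.Dict Char (List Char)) p => p.2.foldl (fun a n => a.modify n [] (· ++ [p.1])) a)
    (fun (a : PySem.Dict Char Int) p => p.2.foldl (fun a n => a.insert p.1 (a.getD p.1 0 + 1)) a)
    (fun (a : PySem.Dict Char Bool) p => p.2.foldl (fun a n => a.insert n false) a)
    (PySem.Dict.empty, PySem.Dict.empty, PySem.Dict.empty)) ?_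
  refine congrArg₂ _ ?_ (congrArg₂ _ ?_ ?_)
  · unfold tAdjF pairs2Of
    rw [← pvFoldlFoldlFlatMap]
    exact (PySem.List.foldl_congr_mem _ _ _ _ (fun acc p _ => by rw [List.foldl_map])).symm
  · unfold tInpBF pairs2Of
    rw [← pvFoldlFoldlFlatMap]
    exact (PySem.List.foldl_congr_mem _ _ _ _ (fun acc p _ => by rw [List.foldl_map])).symm
  · unfold tVisF pairs2Of
    rw [← pvFoldlFoldlFlatMap]
    exact (PySem.List.foldl_congr_mem _ _ _ _ (fun acc p _ => by rw [List.foldl_map])).symm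

theorem tAdjF_getD (adj : PySem.Dict Char (List Char)) (c : Char) :
    (tAdjF adj).getD c [] = ((pairs2Of adj).filter (fun p => p.1 == c)).map (fun p => p.2) := by
  unfold tAdjF
  rw [PySem.Dict.getD_foldl_modify_append]
  simp [PySem.Dict.getD_empty]

theorem tAdjF_keys (adj : PySem.Dict Char (List Char)) :
    (tAdjF adj).keys = PySem.Set.ofList ((pairs2Of adj).map (fun p => p.1)) := by
  unfold tAdjF
  rw [PySem.Dict.keys_foldl_modify_key (pairs2Of adj) (fun p => p.1) [] (fun _ q l => l ++ [q.2])]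
  simp [PySem.Dict.keys_empty, PySem.Set.update_nil_left]

theorem tVisF_get? (adj : PySem.Dict Char (List Char)) (c : Char) :
    (tVisF adj).get? c
      = if c ∈ (pairs2Of adj).map (fun p => p.1) then some false else none := by
  have h : tVisF adj
      = ((pairs2Of adj).map (fun p => p.1)).foldl (fun d x => d.insert x false)
          PySem.Dict.empty := by
    unfold tVisF; rw [List.foldl_map]
  rw [h, genInsFold]
  simp [PySem.Dict.get?_empty]

theorem tVisF_keys (adj : PySem.Dict Char (List Char)) :
    (tVisF adj).keys = PySem.Set.ofList ((pairs2Of adj).map (fun p => p.1)) := by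
  unfold tVisF
  rw [PySem.Dict.keys_foldl_insert_key (pairs2Of adj) (fun p => p.1) (fun _ _ => false)]
  simp [PySem.Dict.keys_empty, PySem.Set.update_nil_left]

theorem tInpAF_getD (adj : PySem.Dict Char (List Char)) (c : Char) :
    (tInpAF adj).getD c 0 = (((pairs2Of adj).map (fun p => p.2)).count c : Int) := by
  have h : tInpAF adj
      = ((pairs2Of adj).map (fun p => p.2)).foldl (fun d x => d.modify x 0 (· + 1))
          PySem.Dict.empty := by
    unfold tInpAF; rw [List.foldl_map]
  rw [h, PySem.Dict.getD_foldl_modify_add_one]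
  simp [PySem.Dict.getD_empty]

theorem tInpBF_getD (adj : PySem.Dict Char (List Char)) (c : Char) :
    (tInpBF adj).getD c 0 = (((pairs2Of adj).map (fun p => p.2)).count c : Int) := by
  have h : tInpBF adj
      = ((pairs2Of adj).map (fun p => p.2)).foldl (fun d x => d.insert x (d.getD x 0 + 1))
          PySem.Dict.empty := by
    unfold tInpBF; rw [List.foldl_map]
  rw [h, PySem.Dict.getD_foldl_insert_add_one]
  simp [PySem.Dict.getD_empty]

-- ---- the check loops agree ----

theorem pvAllCongr {α : Type} (l : List α) (f g : α → Bool) (h : ∀ x ∈ l, f x = g x) :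
    l.all f = l.all g := by
  induction l with
  | nil => rfl
  | cons x xs ih =>
    simp only [List.all_cons]
    rw [h x List.mem_cons_self, ih (fun y hy => h y (List.mem_cons_of_mem _ hy))]

theorem check_eq (g : PySem.Dict Char (List Char)) (vA vB : PySem.Dict Char Bool)
    (iA iB : PySem.Dict Char Int) (hnd : g.keys.Nodup)
    (hvis : ∀ x, vA.get? x = vB.get? x)
    (hinp : ∀ k, iA.getD k 0 = iB.getD k 0)
    (hne : ∀ k ∈ g.keys, g.getD k [] ≠ []) :
    checkA g vA iA = balancedB g vB iB := by
  unfold checkA balancedB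
  rw [PySem.Dict.items_eq_map_keys g hnd [], List.all_map]
  apply pvAllCongr
  intro k hk
  have hlen : 0 < (g.getD k []).length := List.length_pos_of_ne_nil (hne k hk)
  simp only [Function.comp]
  rw [hvis k, hinp k, decide_eq_true hlen]
  cases (vB.get? k).getD true <;> simp

-- ---- heads and nonemptiness ----

theorem pairs_fst (words : List String) :
    (pairsOf words).map (fun p => p.1) = words.map pyFirst := by
  unfold pairsOf; rw [List.map_map]; rfl

theorem ne_nil_filter_fst (P : List (Char × Char)) (k : Char)
    (hk : k ∈ PySem.Set.ofList (P.map (fun p => p.1))) :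
    (P.filter (fun p => p.1 == k)).map (fun p => p.2) ≠ [] := by
  obtain ⟨q, hq, hq1⟩ := List.mem_map.mp ((PySem.Set.mem_ofList _ _).mp hk)
  have hmem : q ∈ P.filter (fun p => p.1 == k) :=
    List.mem_filter.mpr ⟨hq, by simp [hq1]⟩
  exact List.ne_nil_of_mem (List.mem_map_of_mem hmem)

theorem adjF_getD_ne_nil (words : List String) (k : Char) (hk : k ∈ (adjF words).keys) :
    (adjF words).getD k [] ≠ [] := by
  rw [adjF_getD]
  apply ne_nil_filter_fst
  rw [pairs_fst]
  rw [adjF_keys] at hk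
  exact hk

theorem tAdjF_getD_ne_nil (adj : PySem.Dict Char (List Char)) (k : Char)
    (hk : k ∈ (tAdjF adj).keys) : (tAdjF adj).getD k [] ≠ [] := by
  rw [tAdjF_getD]
  apply ne_nil_filter_fst
  rw [tAdjF_keys] at hk
  exact hk

theorem adjF_nodup (words : List String) : (adjF words).keys.Nodup := by
  rw [adjF_keys]; exact PySem.Set.nodup_ofList _

theorem pairs2_head (w : String) (ws : List String) :
    ∃ M, pairs2Of (adjF (w :: ws)) = (pyLast w, pyFirst w) :: M := by
  have hgd : ∃ L, (adjF (w :: ws)).getD (pyFirst w) [] = pyLast w :: L := by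
    rw [adjF_getD]
    unfold pairsOf
    simp only [List.map_cons, List.filter_cons, beq_self_eq_true, if_true]
    exact ⟨_, rfl⟩
  obtain ⟨L, hL⟩ := hgd
  have hkeys : ∃ K, (adjF (w :: ws)).keys = pyFirst w :: K := by
    rw [adjF_keys]
    simp only [List.map_cons]
    rw [PySem.Set.ofList_cons]
    exact ⟨_, rfl⟩
  obtain ⟨K, hK⟩ := hkeys
  have hitems := PySem.Dict.items_eq_map_keys (adjF (w :: ws)) (adjF_nodup _) []
  unfold pairs2Of
  rw [hitems, hK, List.map_cons, List.flatMap_cons, hL, List.map_cons, List.cons_append]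
  exact ⟨_, rfl⟩

theorem tstart_eq (w : String) (ws : List String) :
    (tAdjF (adjF (w :: ws))).keys.headD ' ' = pyLast w := by
  obtain ⟨M, hM⟩ := pairs2_head w ws
  rw [tAdjF_keys, hM, List.map_cons, PySem.Set.ofList_cons]
  rfl

theorem s2_false (w : String) (ws : List String) :
    (tVisF (adjF (w :: ws))).get? (pyLast w) = some false := by
  obtain ⟨M, hM⟩ := pairs2_head w ws
  rw [tVisF_get?, hM, List.map_cons]
  simp

-- ---- the two ports agree on every nonempty word list ----

theorem AB_eq (w : String) (ws : List String) :
    chainedWords (w :: ws) = chainedWords_alt (w :: ws) := by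
  show isEulerianCycleA (pyFirst w) (buildA (w :: ws)).2.1 (buildA (w :: ws)).1
      (buildA (w :: ws)).2.2 = _
  rw [buildA_eq]
  unfold chainedWords_alt
  rw [buildB_eq]
  simp only []
  -- phase 1
  have hsmem : pyFirst w ∈ (w :: ws).map pyFirst := List.mem_map_of_mem List.mem_cons_self
  have hs : (visF (w :: ws)).get? (pyFirst w) = some false := by
    rw [visF_get?, if_pos hsmem]
  have hkeys : (visF (w :: ws)).keys = (adjF (w :: ws)).keys := by
    rw [visF_keys, adjF_keys]
  have h0 : ∀ x, (visF (w :: ws)).get? x = none ∨ (visF (w :: ws)).get? x = some false := by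
    intro x
    rw [visF_get?]
    by_cases hx : x ∈ (w :: ws).map pyFirst
    · exact Or.inr (if_pos hx)
    · exact Or.inl (if_neg hx)
  have hvis1 := phase_eq (adjF (w :: ws)) (visF (w :: ws)) (pyFirst w) hkeys (adjF_nodup _) h0 hs
  have hchk := check_eq (adjF (w :: ws)) _ _ (inpAF (w :: ws)) (inpBF (w :: ws))
    (adjF_nodup _) hvis1 (fun k => by rw [inpAF_getD, inpBF_getD])
    (adjF_getD_ne_nil (w :: ws))
  unfold isEulerianCycleA
  simp only []
  rw [hchk]
  by_cases hc : balancedB (adjF (w :: ws))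
      (sweepB (adjF (w :: ws)) (sweepFuel (adjF (w :: ws))) [pyFirst w] (visF (w :: ws)))
      (inpBF (w :: ws))
  · rw [if_pos hc, if_pos hc]
    -- phase 2
    rw [transposeA_split, transposeB_split]
    simp only []
    rw [tstart_eq w ws]
    obtain ⟨M, hM⟩ := pairs2_head w ws
    have hkeys2 : (tVisF (adjF (w :: ws))).keys = (tAdjF (adjF (w :: ws))).keys := by
      rw [tVisF_keys, tAdjF_keys]
    have hnd2 : (tAdjF (adjF (w :: ws))).keys.Nodup := by
      rw [tAdjF_keys]; exact PySem.Set.nodup_ofList _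
    have h02 : ∀ x, (tVisF (adjF (w :: ws))).get? x = none
        ∨ (tVisF (adjF (w :: ws))).get? x = some false := by
      intro x
      rw [tVisF_get?]
      by_cases hx : x ∈ (pairs2Of (adjF (w :: ws))).map (fun p => p.1)
      · exact Or.inr (if_pos hx)
      · exact Or.inl (if_neg hx)
    have hvis2 := phase_eq (tAdjF (adjF (w :: ws))) (tVisF (adjF (w :: ws))) (pyLast w)
      hkeys2 hnd2 h02 (s2_false w ws)
    exact check_eq (tAdjF (adjF (w :: ws))) _ _ (tInpAF (adjF (w :: ws)))
      (tInpBF (adjF (w :: ws))) hnd2 hvis2 (fun k => by rw [tInpAF_getD, tInpBF_getD])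
      (tAdjF_getD_ne_nil (adjF (w :: ws)))
  · rw [if_neg hc, if_neg hc]

-- ===== VERDICT (by name: the statement is the Claim_ definition above) =====
theorem chainedWords_spec : Claim_equal_chainedWords := by
  intro words _ hPre
  unfold Spec_chainedWords
  match words, hPre.1 with
  | w :: ws, _ => exact AB_eq w ws
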